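-- pv_equiv track=rewrite | github.com/cilame/any-whim | 一些爬虫相关的内容/斗鱼网页版获取真实视频下载链接_20200622.py | limitint
-- ===== SOURCE A (Python) =====
-- def limitint(num):
--     bnum = bin(((1 << 32) - 1) & num)[2:]
--     s = [None] * 32
--     for idx, i in enumerate('{:>032s}'.format(bnum[-32:])):
--         s[idx] = '0' if i == '0' else '1'
--     if s[0] == '1':
--         for i in range(1,32):
--             s[i] = '1' if s[i] == '0' else '0'
--         v = -int(''.join(s[1:]), 2)-1
--     else:
--         v = int(''.join(s),2)
--     return v
-- ===== SOURCE B (Python) =====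
-- def limitint(num):
--     v = num & 0xFFFFFFFF
--     return v - (1 << 32) if v >= (1 << 31) else v
-- ===== Notes on version B (the rewrite author's own statement) =====
-- stated objective: simpler
-- what changed: Replaces per-bit binary-string construction, padding, conditional bit flipping and string-to-int reparsing with closed-form masking arithmetic: v = num & 0xFFFFFFFF, subtract 2^32 when v >= 2^31.
import Mathlib
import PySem

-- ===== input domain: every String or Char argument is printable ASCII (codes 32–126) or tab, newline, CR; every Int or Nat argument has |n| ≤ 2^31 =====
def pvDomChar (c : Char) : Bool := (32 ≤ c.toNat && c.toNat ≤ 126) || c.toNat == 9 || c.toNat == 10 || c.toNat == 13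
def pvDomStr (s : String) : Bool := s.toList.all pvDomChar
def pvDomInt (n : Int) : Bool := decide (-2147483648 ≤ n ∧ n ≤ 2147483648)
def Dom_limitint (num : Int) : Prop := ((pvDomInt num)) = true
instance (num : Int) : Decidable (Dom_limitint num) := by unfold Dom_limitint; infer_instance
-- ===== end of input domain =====

-- B replaces A's per-bit binary-string build / pad / flip / reparse with closed-form masking
-- arithmetic (objective: simpler); both are O(1), no speed claim.

-- ===== PORT A =====
-- hand port of bin(n)[2:] for n ≥ 0 (binary digits, most significant first; exact for
-- nonnegative operands, which is all A passes to it: the masked value is ≥ 0)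
def pvBit (b : Nat) : Char := if b = 0 then '0' else '1'

def pvBin (n : Nat) : List Char :=
  if _h : n < 2 then [pvBit n]
  else pvBin (n / 2) ++ [pvBit (n % 2)]
  termination_by n
  decreasing_by exact Nat.div_lt_self (by omega) (by omega)

-- hand port of int(''.join(cs), 2): exact on the operands A passes it — nonempty strings of
-- '0'/'1' digits only (no sign, whitespace, underscore or prefix)
def pvStep (a : Int) (c : Char) : Int := a * 2 + (if c == '1' then 1 else 0)
def pvParseBin (cs : List Char) : Int := cs.foldl pvStep 0

def limitint (num : Int) : Int :=
  -- bnum = bin(((1 << 32) - 1) & num)[2:]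
  let bnum : List Char := pvBin (PySem.Int.band (((1 : Int) <<< (32:Nat)) - 1) num).toNat
  -- bnum[-32:]
  let cut : List Char := PySem.List.slice bnum (some (-32)) none
  -- '{:>032s}'.format(...): left-pad with the fill char '0' to width 32 (exact here: the
  -- operand is at most 32 chars, so the result has exactly 32 chars)
  let padded : List Char := List.replicate (32 - cut.length) '0' ++ cut
  -- for idx, i in enumerate(...): s[idx] = '0' if i == '0' else '1'
  let s : List Char := padded.map (fun i => if i == '0' then '0' else '1')
  -- s[0] == '1'  (s always has 32 entries, so s[0] is the head and never raises)
  if s.headD ' ' == '1' then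
    -- for i in range(1,32): s[i] = '1' if s[i] == '0' else '0'   (flip s[1:] in place)
    let s2 : List Char := s.tail.map (fun c => if c == '0' then '1' else '0')
    -- v = -int(''.join(s[1:]), 2) - 1
    let v : Int := -(pvParseBin s2) - 1
    v
  else
    -- v = int(''.join(s), 2)
    pvParseBin s

-- ===== PORT B =====
def limitint_alt (num : Int) : Int :=
  -- v = num & 0xFFFFFFFF
  let v : Int := PySem.Int.band num 0xFFFFFFFF
  -- v - (1 << 32) if v >= (1 << 31) else v
  if v ≥ ((1 : Int) <<< (31:Nat)) then v - ((1 : Int) <<< (32:Nat)) else v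

-- ===== PRECONDITION & SPEC =====
def Spec_limitint (num : Int) (out : Int) : Prop := out = limitint_alt num
instance (num : Int) (out : Int) : Decidable (Spec_limitint num out) := by unfold Spec_limitint; infer_instance

-- ===== CLAIM (what is proved, stated in full; the proofs are below) =====
def Claim_equal_limitint : Prop := ∀ (num : Int), Dom_limitint num → Spec_limitint num (limitint num)

-- ===== LEMMAS AND PROOFS =====

-- Python's  mask & n  with mask = 2^32 - 1 is n mod 2^32
theorem pv_band_mask (n : Int) : PySem.Int.band 4294967295 n = n % 4294967296 := by
  unfold PySem.Int.band
  have hp : (2:Nat)^32 = 4294967296 := by norm_num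
  by_cases hn : 0 ≤ n
  · simp only [hn, if_true, show (0:Int) ≤ 4294967295 by norm_num]
    rw [show (4294967295:Int).toNat = 2^32 - 1 by rfl, Nat.and_comm,
        Nat.and_two_pow_sub_one_eq_mod, hp]
    omega
  · simp only [hn, if_false, if_true, show (0:Int) ≤ 4294967295 by norm_num]
    rw [show (4294967295:Int).toNat = 2^32 - 1 by rfl, Nat.and_comm,
        Nat.and_two_pow_sub_one_eq_mod, hp]
    omega

def pvIsBits (cs : List Char) : Prop := ∀ c ∈ cs, c = '0' ∨ c = '1'

theorem pvBin_bits (n : Nat) : pvIsBits (pvBin n) := by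
  induction n using pvBin.induct with
  | case1 n h =>
    intro c hc
    rw [pvBin, dif_pos h] at hc
    simp at hc
    subst hc
    unfold pvBit; split <;> simp
  | case2 n h ih =>
    intro c hc
    rw [pvBin, dif_neg h] at hc
    rcases List.mem_append.1 hc with h1 | h1
    · exact ih c h1
    · simp at h1; subst h1; unfold pvBit; split <;> simp

theorem pvBin_length_le (k : Nat) (n : Nat) (hk : 1 ≤ k) (h : n < 2 ^ k) :
    (pvBin n).length ≤ k := by
  induction k generalizing n with
  | zero => omega
  | succ k ih =>
    by_cases h2 : n < 2
    · rw [pvBin, dif_pos h2]; simp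
    · rw [pvBin, dif_neg h2]
      have hk1 : 1 ≤ k := by
        rcases k with _ | k
        · simp [pow_succ] at h; omega
        · omega
      have hlt : n / 2 < 2 ^ k := by
        rw [pow_succ] at h; omega
      have := ih (n / 2) hk1 hlt
      simp [List.length_append]; omega

theorem pvBin_foldl (n : Nat) (a : Int) :
    (pvBin n).foldl pvStep a = a * 2 ^ (pvBin n).length + n := by
  induction n using pvBin.induct generalizing a with
  | case1 n h =>
    rw [pvBin, dif_pos h]
    interval_cases n <;> simp [pvStep, pvBit]
  | case2 n h ih =>
    rw [pvBin, dif_neg h]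
    rw [List.foldl_append, ih]
    simp only [List.foldl_cons, List.foldl_nil, List.length_append, List.length_cons,
      List.length_nil]
    have h2 : pvStep (a * 2 ^ (pvBin (n / 2)).length + ↑(n / 2)) (pvBit (n % 2))
        = (a * 2 ^ (pvBin (n / 2)).length + ↑(n / 2)) * 2 + (n % 2 : Nat) := by
      unfold pvStep pvBit
      rcases Nat.mod_two_eq_zero_or_one n with h3 | h3 <;> simp [h3]
    rw [h2, pow_succ]
    have h4 : ((n : Int)) = (n / 2 : Nat) * 2 + (n % 2 : Nat) := by omega
    rw [h4]; ring

theorem pv_foldl_replicate (k : Nat) (a : Int) :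
    (List.replicate k '0').foldl pvStep a = a * 2 ^ k := by
  induction k generalizing a with
  | zero => simp
  | succ k ih =>
    rw [List.replicate_succ, List.foldl_cons, ih]
    simp [pvStep, pow_succ]; ring

theorem pv_foldl_acc (l : List Char) (a : Int) :
    l.foldl pvStep a = a * 2 ^ l.length + l.foldl pvStep 0 := by
  induction l generalizing a with
  | nil => simp
  | cons c t ih =>
    rw [List.foldl_cons, List.foldl_cons, ih (pvStep a c), ih (pvStep 0 c)]
    simp only [List.length_cons, pow_succ, pvStep]
    ring

theorem pv_foldl_bounds (l : List Char) (hl : pvIsBits l) (a : Int) :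
    a * 2 ^ l.length ≤ l.foldl pvStep a ∧ l.foldl pvStep a < (a + 1) * 2 ^ l.length := by
  induction l generalizing a with
  | nil => simp
  | cons c t ih =>
    have ht : pvIsBits t := fun x hx => hl x (by simp [hx])
    have h2 : (0:Int) < 2 ^ t.length := pow_pos (by norm_num) _
    rw [List.foldl_cons]
    simp only [List.length_cons, pow_succ]
    rcases hl c (by simp) with h | h <;> subst h
    · have hih := ih ht (pvStep a '0')
      have hs : pvStep a '0' = a * 2 := by simp [pvStep]
      rw [hs] at hih ⊢
      constructor <;> nlinarith [hih.1, hih.2]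
    · have hih := ih ht (pvStep a '1')
      have hs : pvStep a '1' = a * 2 + 1 := by simp [pvStep]
      rw [hs] at hih ⊢
      constructor <;> nlinarith [hih.1, hih.2]

theorem pv_foldl_flip (l : List Char) (hl : pvIsBits l) (a b : Int) :
    l.foldl pvStep a + (l.map (fun c => if c == '0' then '1' else '0')).foldl pvStep b
      = (a + b + 1) * 2 ^ l.length - 1 := by
  induction l generalizing a b with
  | nil => simp
  | cons c t ih =>
    have hc := hl c (by simp)
    have ht : pvIsBits t := fun x hx => hl x (by simp [hx])
    simp only [List.map_cons, List.foldl_cons, List.length_cons]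
    rw [ih ht]
    rcases hc with h | h <;> subst h <;> simp [pvStep] <;> rw [pow_succ] <;> ring

theorem pv_map_id_bits (l : List Char) (hl : pvIsBits l) :
    l.map (fun i => if i == '0' then '0' else '1') = l := by
  induction l with
  | nil => simp
  | cons c t ih =>
    have hc := hl c (by simp)
    have ht : pvIsBits t := fun x hx => hl x (by simp [hx])
    simp only [List.map_cons, ih ht]
    rcases hc with h | h <;> subst h <;> simp

-- ===== VERDICT (by name: the statement is the Claim_ definition above) =====
theorem limitint_spec : Claim_equal_limitint := by
  intro num _
  show limitint num = limitint_alt num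
  simp only [limitint, limitint_alt]
  have hsh32 : ((1 : Int) <<< (32:Nat)) = 4294967296 := by decide
  have hsh31 : ((1 : Int) <<< (31:Nat)) = 2147483648 := by decide
  have hmaskA : PySem.Int.band (((1 : Int) <<< (32:Nat)) - 1) num = num % 4294967296 := by
    rw [hsh32]; exact_mod_cast pv_band_mask num
  have hmaskB : PySem.Int.band num 0xFFFFFFFF = num % 4294967296 := by
    rw [PySem.Int.band_comm]; exact_mod_cast pv_band_mask num
  rw [hmaskA, hmaskB, hsh31, hsh32]
  set e : Int := num % 4294967296 with he
  have he0 : 0 ≤ e := Int.emod_nonneg _ (by norm_num)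
  have heM : e < 4294967296 := Int.emod_lt_of_pos _ (by norm_num)
  set m : Nat := e.toNat with hm
  have hme : (m : Int) = e := Int.toNat_of_nonneg he0
  have hmlt : m < 2 ^ 32 := by
    have : (2:Nat)^32 = 4294967296 := by norm_num
    omega
  have hlen : (pvBin m).length ≤ 32 := pvBin_length_le 32 m (by norm_num) hmlt
  have hcut : PySem.List.slice (pvBin m) (some (-32)) none = pvBin m := by
    rw [PySem.List.slice_from_neg_ofNat _ 32 (by norm_num)]
    have : (pvBin m).length - 32 = 0 := by omega
    rw [this, List.drop_zero]
  rw [hcut]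
  set padded : List Char := List.replicate (32 - (pvBin m).length) '0' ++ pvBin m with hpad
  have hbits : pvIsBits padded := by
    intro c hc
    rcases List.mem_append.1 hc with h1 | h1
    · left; exact List.eq_of_mem_replicate h1
    · exact pvBin_bits m c h1
  have hplen : padded.length = 32 := by
    simp only [hpad, List.length_append, List.length_replicate]
    omega
  rw [pv_map_id_bits padded hbits]
  have hparse : padded.foldl pvStep 0 = (m : Int) := by
    rw [hpad, List.foldl_append, pv_foldl_replicate, pvBin_foldl]
    ring
  obtain ⟨c, rest, hcr⟩ : ∃ c rest, padded = c :: rest := by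
    cases hp : padded with
    | nil => rw [hp] at hplen; simp at hplen
    | cons c rest => exact ⟨c, rest, rfl⟩
  have hrbits : pvIsBits rest := by
    intro x hx; exact hbits x (by rw [hcr]; simp [hx])
  have hrlen : rest.length = 31 := by
    rw [hcr] at hplen; simpa using hplen
  set r : Int := rest.foldl pvStep 0 with hr
  have hrb := pv_foldl_bounds rest hrbits 0
  rw [hrlen] at hrb
  have hr0 : 0 ≤ r := by simpa using hrb.1
  have hrM : r < 2147483648 := by
    have : ((0:Int) + 1) * 2 ^ 31 = 2147483648 := by norm_num
    rw [this] at hrb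
    exact hrb.2
  have hsplit : (m : Int) = (if c == '1' then 1 else 0) * 2 ^ 31 + r := by
    rw [← hparse, hcr, List.foldl_cons, pv_foldl_acc rest (pvStep 0 c), hrlen]
    simp [pvStep]
    exact hr.symm
  rcases hbits c (by rw [hcr]; simp) with hc0 | hc1
  · -- leading bit '0': both sides return e
    subst hc0
    rw [hcr]
    simp only [List.headD_cons, show (('0' == '1')) = false by decide, Bool.false_eq_true,
      if_false]
    have hmval : (m : Int) = r := by simpa using hsplit
    have hlt : ¬ e ≥ 2147483648 := by omega
    rw [if_neg hlt, ← hcr]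
    unfold pvParseBin
    rw [hparse, hme]
  · -- leading bit '1': A flips and negates, B subtracts 2^32
    subst hc1
    rw [hcr]
    simp only [List.headD_cons, List.tail_cons, show (('1' == '1')) = true by decide,
      if_true]
    have hflip := pv_foldl_flip rest hrbits 0 0
    rw [hrlen] at hflip
    simp only [beq_iff_eq] at hflip ⊢
    norm_num at hflip
    have hmval : (m : Int) = 2147483648 + r := by
      simpa using hsplit
    have hge : e ≥ 2147483648 := by omega
    rw [if_pos hge]
    unfold pvParseBin
    omega
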